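-- pv_equiv track=rewrite | github.com/yui-tan/pyPromptChecker | pyPromptChecker/gui/search.py | target_string_adjust
-- ===== SOURCE A (Python) =====
-- def target_string_adjust(positive: bool, negative: bool, region: bool, target: list):
--     positive_target = []
--     negative_target = []
--     region_target = []
--     result = []
--
--     if positive:
--         positive_target = [value.get('Positive') for value in target]
--     if negative:
--         negative_target = [value.get('Negative') for value in target]
--     if region:
--         for tg in target:
--             number = tg.get('Region control', None)
--             if not number:
--                 region_target.append('---')
--             else:
--                 str_target = ''
--                 for cnt in range(1, int(number) + 1):
--                     prompt = tg.get('Region ' + str(cnt) + ' prompt')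
--                     negative = tg.get('Region ' + str(cnt) + ' neg prompt')
--                     region_prompt = prompt + ', ' + negative
--                     str_target += region_prompt
--                 region_target.append(str_target)
--
--     with_values = [x for x in [positive_target, negative_target, region_target] if x]
--     values_count = len(with_values)
--
--     if values_count == 1:
--         result = [value for d1 in with_values for value in d1]
--     elif values_count == 2:
--         result = [str(x) + '\n' + str(y) for x, y in zip(*with_values)]
--     elif values_count == 3:
--         result = [str(x) + '\n' + str(y) + '\n' + str(z) for x, y, z in zip(*with_values)]
--
--     return result
-- ===== SOURCE B (Python) =====
-- def target_string_adjust(positive: bool, negative: bool, region: bool, target: list):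
--     # Row-major single pass: assemble the active pieces per dict instead of
--     # building three whole columns and zipping them.
--     if not target:
--         return []
--     count = (1 if positive else 0) + (1 if negative else 0) + (1 if region else 0)
--     if count == 0:
--         return []
--
--     def region_string(tg):
--         number = tg.get('Region control', None)
--         if not number:
--             return '---'
--         return ''.join(tg.get('Region %d prompt' % cnt) + ', ' + tg.get('Region %d neg prompt' % cnt)
--                        for cnt in range(1, int(number) + 1))
--
--     def row(tg):
--         pieces = []
--         if positive:
--             pieces.append(tg.get('Positive'))
--         if negative:
--             pieces.append(tg.get('Negative'))
--         if region:
--             pieces.append(region_string(tg))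
--         if count == 1:
--             return pieces[0]
--         return '\n'.join(str(p) for p in pieces)
--
--     return [row(tg) for tg in target]
-- ===== Notes on version B (the rewrite author's own statement) =====
-- stated objective: simpler
-- what changed: Replaces A's build-three-full-columns-then-filter-zip-and-branch-on-arity with one row-major pass that assembles only the active pieces per dict and joins them, with the raw single-column value kept as in A.
-- outside the precondition, e.g. on target_string_adjust(True, False, False, [{}]): A returns [None], B returns [None]
import Mathlib
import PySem

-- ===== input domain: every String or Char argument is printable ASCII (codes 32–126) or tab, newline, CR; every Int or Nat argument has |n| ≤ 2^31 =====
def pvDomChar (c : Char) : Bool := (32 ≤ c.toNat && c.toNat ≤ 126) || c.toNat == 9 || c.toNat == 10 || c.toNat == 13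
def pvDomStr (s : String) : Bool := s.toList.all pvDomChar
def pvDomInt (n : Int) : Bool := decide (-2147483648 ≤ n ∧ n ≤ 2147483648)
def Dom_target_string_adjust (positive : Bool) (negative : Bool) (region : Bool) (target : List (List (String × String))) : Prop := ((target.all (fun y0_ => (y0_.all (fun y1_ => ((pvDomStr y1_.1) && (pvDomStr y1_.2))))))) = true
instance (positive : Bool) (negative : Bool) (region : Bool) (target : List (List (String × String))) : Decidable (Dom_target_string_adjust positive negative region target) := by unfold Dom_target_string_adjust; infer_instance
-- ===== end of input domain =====

-- B is a simpler row-major single pass (active pieces per dict) instead of A's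
-- three whole columns filtered, zipped and branched on arity; return values agree on Pre_.

-- ===== PORT A =====
-- str(x) where x is an Option String (a dict .get result): str(None) = 'None'
def pvPyStr (o : Option String) : String :=
  match o with
  | none => "None"
  | some s => s

-- A's region loop body for one dict: '---' for falsy control, else the
-- concatenated 'prompt, neg' pieces accumulated with += over range(1, int(number)+1).
-- .getD defaults stand where Python raises (int() ValueError, None + str TypeError):
-- exactly those inputs are excluded by Pre_.
def pvRegionA (tg : List (String × String)) : String :=
  match (PySem.Dict.mk tg).get? "Region control" with
  | none => "---"
  | some s =>
    if s = "" then "---"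
    else
      let n : Int := (PySem.Int.ofStr? s).getD 0
      (PySem.List.pyRange 1 (n + 1) 1).foldl
        (fun acc cnt =>
          let prompt := ((PySem.Dict.mk tg).get? ("Region " ++ PySem.Int.toStr cnt ++ " prompt")).getD ""
          let neg := ((PySem.Dict.mk tg).get? ("Region " ++ PySem.Int.toStr cnt ++ " neg prompt")).getD ""
          acc ++ (prompt ++ ", " ++ neg)) ""

-- the region column is lifted to Option String so the three candidate columns share
-- one type; the raw single-column extraction (.getD "") is exact under Pre_.
def target_string_adjust (positive : Bool) (negative : Bool) (region : Bool) (target : List (List (String × String))) : List String :=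
  let positive_target : List (Option String) :=
    if positive then target.map (fun value => (PySem.Dict.mk value).get? "Positive") else []
  let negative_target : List (Option String) :=
    if negative then target.map (fun value => (PySem.Dict.mk value).get? "Negative") else []
  let region_target : List (Option String) :=
    if region then target.foldl (fun acc tg => acc ++ [some (pvRegionA tg)]) [] else []
  let with_values := [positive_target, negative_target, region_target].filter (fun l => !l.isEmpty)
  match with_values with
  | [a] => a.map (fun o => o.getD "")
  | [a, b] => (a.zip b).map (fun p => pvPyStr p.1 ++ "\n" ++ pvPyStr p.2)
  | [a, b, c] => ((a.zip b).zip c).map (fun p => pvPyStr p.1.1 ++ "\n" ++ pvPyStr p.1.2 ++ "\n" ++ pvPyStr p.2)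
  | _ => []

-- ===== PORT B =====
-- B's region_string: ''.join over the generated pieces (same .getD convention as A's port)
def pvRegionB (tg : List (String × String)) : String :=
  match (PySem.Dict.mk tg).get? "Region control" with
  | none => "---"
  | some s =>
    if s = "" then "---"
    else
      let n : Int := (PySem.Int.ofStr? s).getD 0
      String.join ((PySem.List.pyRange 1 (n + 1) 1).map (fun cnt =>
        ((PySem.Dict.mk tg).get? ("Region " ++ PySem.Int.toStr cnt ++ " prompt")).getD "" ++ ", " ++
        ((PySem.Dict.mk tg).get? ("Region " ++ PySem.Int.toStr cnt ++ " neg prompt")).getD ""))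

def target_string_adjust_alt (positive : Bool) (negative : Bool) (region : Bool) (target : List (List (String × String))) : List String :=
  if target.isEmpty then []
  else
    let count : Nat := (if positive then 1 else 0) + (if negative then 1 else 0) + (if region then 1 else 0)
    if count = 0 then []
    else
      target.map (fun tg =>
        let pieces : List (Option String) :=
          (if positive then [(PySem.Dict.mk tg).get? "Positive"] else []) ++
          (if negative then [(PySem.Dict.mk tg).get? "Negative"] else []) ++
          (if region then [some (pvRegionB tg)] else [])
        if count = 1 then (pieces.headD none).getD ""
        else String.intercalate "\n" (pieces.map pvPyStr))

-- ===== PRECONDITION & SPEC =====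
-- per-dict region check: a truthy 'Region control' must parse as int and every
-- 'Region k (neg )prompt' key for k in range(1, n+1) must be present
def pvRegionOk (tg : List (String × String)) : Bool :=
  match (PySem.Dict.mk tg).get? "Region control" with
  | none => true
  | some s =>
    s == "" ||
    ((PySem.Int.ofStr? s).isSome &&
      (PySem.List.pyRange 1 ((PySem.Int.ofStr? s).getD 0 + 1) 1).all (fun cnt =>
        ((PySem.Dict.mk tg).get? ("Region " ++ PySem.Int.toStr cnt ++ " prompt")).isSome &&
        ((PySem.Dict.mk tg).get? ("Region " ++ PySem.Int.toStr cnt ++ " neg prompt")).isSome))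

-- Pre_ excludes the inputs where A raises (a truthy non-int 'Region control' →
-- ValueError; a missing region prompt key → TypeError on None + str) and the inputs
-- where A returns a list containing None rather than strings (a single active
-- dict column with the key absent in some dict) — not a value of List String.
def Pre_target_string_adjust (positive : Bool) (negative : Bool) (region : Bool) (target : List (List (String × String))) : Prop :=
  (region = true → target.all pvRegionOk = true) ∧
  ((positive && !negative && !region) = true →
    target.all (fun tg => ((PySem.Dict.mk tg).get? "Positive").isSome) = true) ∧
  ((negative && !positive && !region) = true →
    target.all (fun tg => ((PySem.Dict.mk tg).get? "Negative").isSome) = true)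
instance (positive : Bool) (negative : Bool) (region : Bool) (target : List (List (String × String))) : Decidable (Pre_target_string_adjust positive negative region target) := by unfold Pre_target_string_adjust; infer_instance

def pvWitness_target_string_adjust : Bool × Bool × Bool × (List (List (String × String))) :=
  (true, true, true,
   [[("Positive", "a girl"), ("Negative", "lowres"), ("Region control", "1"),
     ("Region 1 prompt", "sky"), ("Region 1 neg prompt", "ground")],
    [("Positive", "a boy"), ("Negative", "bad hands"), ("Region control", "")]])

def Spec_target_string_adjust (positive : Bool) (negative : Bool) (region : Bool) (target : List (List (String × String))) (out : List String) : Prop := out = target_string_adjust_alt positive negative region target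
instance (positive : Bool) (negative : Bool) (region : Bool) (target : List (List (String × String))) (out : List String) : Decidable (Spec_target_string_adjust positive negative region target out) := by unfold Spec_target_string_adjust; infer_instance

-- ===== CLAIM (what is proved, stated in full; the proofs are below) =====
def Claim_equal_target_string_adjust : Prop := ∀ (positive : Bool) (negative : Bool) (region : Bool) (target : List (List (String × String))), Dom_target_string_adjust positive negative region target → Pre_target_string_adjust positive negative region target → Spec_target_string_adjust positive negative region target (target_string_adjust positive negative region target)

-- ===== LEMMAS AND PROOFS =====

-- A's str_target accumulator equals B's ''.join of the mapped pieces
lemma foldl_str_append (l : List String) (a : String) :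
    l.foldl (fun r s => r ++ s) a = a ++ l.foldl (fun r s => r ++ s) "" := by
  induction l generalizing a with
  | nil => simp
  | cons x xs ih =>
    rw [List.foldl_cons, List.foldl_cons, ih (a ++ x), ih ("" ++ x)]
    simp [String.append_assoc]

lemma foldl_append_eq_join (l : List Int) (f : Int → String) (acc : String) :
    l.foldl (fun s c => s ++ f c) acc = acc ++ String.join (l.map f) := by
  induction l generalizing acc with
  | nil => simp [String.join]
  | cons x xs ih =>
    rw [List.foldl_cons, ih, List.map_cons]
    simp only [String.join, List.foldl_cons]
    rw [foldl_str_append (List.map f xs) ("" ++ f x)]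
    simp [String.append_assoc]

-- '\n'.join evaluated on the two fixed arities A's comprehensions produce
lemma intercalate_two (a b : String) : String.intercalate "\n" [a, b] = a ++ "\n" ++ b := rfl

lemma intercalate_three (a b c : String) :
    String.intercalate "\n" [a, b, c] = a ++ "\n" ++ b ++ "\n" ++ c := rfl

lemma regionA_eq_regionB (tg : List (String × String)) : pvRegionA tg = pvRegionB tg := by
  unfold pvRegionA pvRegionB
  cases (PySem.Dict.mk tg).get? "Region control" with
  | none => rfl
  | some s =>
    by_cases hs : s = ""
    · simp [hs]
    · simp only [if_neg hs]
      rw [foldl_append_eq_join]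
      simp

-- A's region column foldl builds the map of pvRegionA
lemma foldl_region_eq_map (target : List (List (String × String))) (acc : List (Option String)) :
    target.foldl (fun a tg => a ++ [some (pvRegionA tg)]) acc
      = acc ++ target.map (fun tg => some (pvRegionA tg)) := by
  induction target generalizing acc with
  | nil => simp
  | cons x xs ih => simp [ih]

theorem target_string_adjust_spec : Claim_equal_target_string_adjust := by
  intro positive negative region target _ _
  unfold Spec_target_string_adjust target_string_adjust target_string_adjust_alt
  cases positive <;> cases negative <;> cases region <;>
    cases target with
  | nil => rfl
  | cons hd tl =>
      simp only [Bool.false_eq_true, if_true, if_false, ite_true, ite_false,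
        foldl_region_eq_map, List.nil_append, List.filter, List.isEmpty_cons,
        List.map_cons, Bool.not_false, Bool.not_true, List.isEmpty_nil, List.isEmpty]
      all_goals (first
        | rfl
        | (simp only [List.zip_map', List.map_map, List.zip_cons_cons, List.map_cons]
           simp [regionA_eq_regionB, List.zip_map', intercalate_two, intercalate_three,
             Function.comp, List.map_map, pvPyStr, String.join]))
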